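-- pv_equiv track=rewrite | github.com/KevinHeiwa/MCGTM | Watermark/interesting_functions.py | count_brackets_Mirror
-- ===== SOURCE A (Python) =====
-- def count_brackets_Mirror(string):
--     count_parentheses = 0
--     count_brackets = 0
--     count_braces = 0
--
--     for char in string:
--         if char == ')':
--             count_parentheses += 1
--         elif char == ']':
--             count_brackets += 1
--         elif char == '}':
--             count_braces += 1
--     return count_parentheses, count_brackets, count_braces
-- ===== SOURCE B (Python) =====
-- def count_brackets_Mirror(string):
--     # Three independent substring counts instead of one accumulator loop.
--     return string.count(')'), string.count(']'), string.count('}')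
-- ===== Notes on version B (the rewrite author's own statement) =====
-- stated objective: idiomatic
-- what changed: Replaced the single conditional-increment accumulator loop with three independent str.count scans, one per bracket character.
import Mathlib
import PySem

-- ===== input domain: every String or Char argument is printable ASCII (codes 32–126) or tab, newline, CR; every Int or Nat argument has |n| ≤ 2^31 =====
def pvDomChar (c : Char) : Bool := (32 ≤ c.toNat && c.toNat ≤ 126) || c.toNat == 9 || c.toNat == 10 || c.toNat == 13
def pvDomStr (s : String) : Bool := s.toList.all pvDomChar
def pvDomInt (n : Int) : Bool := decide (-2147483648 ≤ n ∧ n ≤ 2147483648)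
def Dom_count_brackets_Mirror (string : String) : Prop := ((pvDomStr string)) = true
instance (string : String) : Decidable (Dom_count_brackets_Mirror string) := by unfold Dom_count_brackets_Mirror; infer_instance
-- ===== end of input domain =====

-- B replaces A's single conditional-increment loop with three independent str.count scans (idiomatic; same O(n) cost).


-- ===== PORT A =====
-- Literal port of A: one pass with three conditionally-incremented counters.
def count_brackets_Mirror (string : String) : Int × Int × Int :=
  string.toList.foldl
    (fun (acc : Int × Int × Int) char =>
      if char == ')' then (acc.1 + 1, acc.2.1, acc.2.2)
      else if char == ']' then (acc.1, acc.2.1 + 1, acc.2.2)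
      else if char == '}' then (acc.1, acc.2.1, acc.2.2 + 1)
      else acc)
    (0, 0, 0)

-- ===== PORT B =====
-- B: three independent str.count scans (different decomposition, same O(n) cost).
def count_brackets_Mirror_alt (string : String) : Int × Int × Int :=
  ((PySem.Str.count string ")" : Int),
   (PySem.Str.count string "]" : Int),
   (PySem.Str.count string "}" : Int))

-- ===== PRECONDITION & SPEC =====
def Spec_count_brackets_Mirror (string : String) (out : Int × Int × Int) : Prop := out = count_brackets_Mirror_alt string
instance (string : String) (out : Int × Int × Int) : Decidable (Spec_count_brackets_Mirror string out) := by unfold Spec_count_brackets_Mirror; infer_instance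

-- ===== CLAIM (what is proved, stated in full; the proofs are below) =====
def Claim_equal_count_brackets_Mirror : Prop := ∀ (string : String), Dom_count_brackets_Mirror string → Spec_count_brackets_Mirror string (count_brackets_Mirror string)

-- ===== LEMMAS AND PROOFS =====

-- Chars.count with a single-character needle is List.count.
theorem chars_count_go_singleton (c : Char) (l : List Char) (fuel : Nat) (acc : Nat)
    (h : l.length ≤ fuel) :
    PySem.Chars.count.go [c] fuel l acc = acc + l.count c := by
  induction l generalizing fuel acc with
  | nil => cases fuel <;> simp [PySem.Chars.count.go]
  | cons x t ih =>
    cases fuel with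
    | zero => simp at h
    | succ n =>
      simp only [List.length_cons, Nat.succ_le_succ_iff] at h
      by_cases hx : c = x
      · subst hx
        simp [PySem.Chars.count.go, List.isPrefixOf, ih _ _ h]
        omega
      · have hbeq : (c == x) = false := by simp [hx]
        simp [PySem.Chars.count.go, List.isPrefixOf, hbeq, ih _ _ h, Ne.symm hx]

theorem chars_count_singleton (c : Char) (l : List Char) :
    PySem.Chars.count l [c] = l.count c := by
  simpa [PySem.Chars.count] using chars_count_go_singleton c l l.length 0 le_rfl

-- A's fold computes the three counts, shifted by the accumulator.
theorem foldA_eq (l : List Char) (a b c : Int) :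
    l.foldl
      (fun (acc : Int × Int × Int) char =>
        if char == ')' then (acc.1 + 1, acc.2.1, acc.2.2)
        else if char == ']' then (acc.1, acc.2.1 + 1, acc.2.2)
        else if char == '}' then (acc.1, acc.2.1, acc.2.2 + 1)
        else acc)
      (a, b, c)
    = (a + l.count ')', b + l.count ']', c + l.count '}') := by
  induction l generalizing a b c with
  | nil => simp
  | cons x t ih =>
    rw [List.foldl_cons]
    by_cases h1 : x = ')'
    · subst h1
      rw [if_pos (by decide : ((')' : Char) == ')') = true), ih]
      simp [Prod.ext_iff]
      omega
    · by_cases h2 : x = ']'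
      · subst h2
        rw [if_neg (by decide), if_pos (by decide : ((']' : Char) == ']') = true), ih]
        simp [Prod.ext_iff]
        omega
      · by_cases h3 : x = '}'
        · subst h3
          rw [if_neg (by decide), if_neg (by decide), if_pos (by decide : (('}' : Char) == '}') = true), ih]
          simp [Prod.ext_iff]
          omega
        · rw [if_neg (by simp [h1]), if_neg (by simp [h2]), if_neg (by simp [h3]), ih]
          simp [h1, h2, h3]

-- ===== VERDICT (by name: the statement is the Claim_ definition above) =====
theorem count_brackets_Mirror_spec : Claim_equal_count_brackets_Mirror := by
  intro s _
  unfold Spec_count_brackets_Mirror count_brackets_Mirror count_brackets_Mirror_alt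
  rw [foldA_eq]
  simp [PySem.Str.count_eq, chars_count_singleton]
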